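-- pv_equiv track=rewrite | github.com/meliksahyorulmazlar/My-Leetcode-Solutions | 2582. Pass the Pillow (Leetcode)/main.py | passThePillow
-- ===== SOURCE A (Python) =====
-- def passThePillow(n: int, time: int) -> int:
--     array = [i for i in range(1, n + 1)]
--     index = 0
--     forward = True
--
--     for i in range(time):
--         if forward:
--             index += 1
--         else:
--             index -= 1
--         item = array[index]
--
--         if item == n:
--             forward = False
--
--         if item == 1:
--             forward = True
--     return index + 1
-- ===== SOURCE B (Python) =====
-- def passThePillow(n: int, time: int) -> int:
--     # Closed form: the walk is periodic with period 2*(n-1).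
--     if time <= 0:
--         return 1
--     t = time % (2 * (n - 1))
--     return t + 1 if t < n else 2 * (n - 1) - t + 1
-- ===== Notes on version B (the rewrite author's own statement) =====
-- stated objective: faster
-- what changed: Replaced the step-by-step O(time) simulation over an explicit people array with an O(1) closed form: reduce time modulo the period 2*(n-1) and reflect the position on the return leg.
import Mathlib
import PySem

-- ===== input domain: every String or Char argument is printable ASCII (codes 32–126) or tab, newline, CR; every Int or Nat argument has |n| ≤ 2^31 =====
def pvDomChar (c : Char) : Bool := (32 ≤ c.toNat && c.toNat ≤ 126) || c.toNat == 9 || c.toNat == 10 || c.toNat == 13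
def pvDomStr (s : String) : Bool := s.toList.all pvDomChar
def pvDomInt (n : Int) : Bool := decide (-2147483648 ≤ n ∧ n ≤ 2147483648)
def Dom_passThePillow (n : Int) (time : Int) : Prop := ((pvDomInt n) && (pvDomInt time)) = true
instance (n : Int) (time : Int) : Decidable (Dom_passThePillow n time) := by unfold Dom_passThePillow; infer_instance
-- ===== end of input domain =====

-- B replaces A's O(time) step-by-step simulation with an O(1) closed form (time mod 2*(n-1), reflected).

-- ===== PORT A =====
-- One iteration of A's for-loop body (state = (index, forward); the loop variable i is unused).
def pillowStep (n : Int) (array : List Int) (s : Int × Bool) (_i : Int) : Int × Bool :=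
  let index := if s.2 then s.1 + 1 else s.1 - 1
  -- array[index]: IndexError (pyGetD's default never used) only on inputs Pre_ excludes
  let item := PySem.List.pyGetD array index 0
  let fwd1 := if item = n then false else s.2
  let fwd2 := if item = 1 then true else fwd1
  (index, fwd2)

-- Literal port of A: build the array [1..n], walk `time` steps flipping direction at the ends.
def passThePillow (n : Int) (time : Int) : Int :=
  let array := PySem.List.pyRange 1 (n + 1) 1
  let st := (PySem.List.pyRange 0 time 1).foldl (pillowStep n array) (0, true)
  st.1 + 1

-- ===== PORT B =====
def passThePillow_alt (n : Int) (time : Int) : Int :=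
  if time ≤ 0 then 1
  else
    let t := PySem.Int.mod time (2 * (n - 1))
    if t < n then t + 1 else 2 * (n - 1) - t + 1

-- ===== PRECONDITION & SPEC =====
-- A raises IndexError (array[1] with len(array) ≤ 1) exactly when n ≤ 1 and time ≥ 1; Pre_ excludes only those.
def Pre_passThePillow (n : Int) (time : Int) : Prop := 2 ≤ n ∨ time ≤ 0
instance (n : Int) (time : Int) : Decidable (Pre_passThePillow n time) := by unfold Pre_passThePillow; infer_instance
def pvWitness_passThePillow : Int × Int := (4, 7)

def Spec_passThePillow (n : Int) (time : Int) (out : Int) : Prop := out = passThePillow_alt n time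
instance (n : Int) (time : Int) (out : Int) : Decidable (Spec_passThePillow n time out) := by unfold Spec_passThePillow; infer_instance

-- ===== CLAIM (what is proved, stated in full; the proofs are below) =====
def Claim_equal_passThePillow : Prop := ∀ (n : Int) (time : Int), Dom_passThePillow n time → Pre_passThePillow n time → Spec_passThePillow n time (passThePillow n time)

-- ===== LEMMAS AND PROOFS =====

-- Closed form of A's loop state after r steps within one period (m = 2*(n-1)):
-- index = r on the forward leg (r ≤ n-1), m - r on the return leg; forward ↔ r ≤ n-2.
def pillowState (n : Int) (r : Int) : Int × Bool :=
  (if r ≤ n - 1 then r else 2 * (n - 1) - r, decide (r ≤ n - 2))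

-- array[i] = 1 + i for the array [1..n]
theorem pillow_array_get (n : Int) (i : Int) (h0 : 0 ≤ i) (h1 : i ≤ n - 1) :
    PySem.List.pyGetD (PySem.List.pyRange 1 (n + 1) 1) i 0 = 1 + i := by
  have hlen : (PySem.List.pyRange 1 (n + 1) 1).length = n.toNat := by
    rw [PySem.List.length_pyRange_one]; omega
  rw [PySem.List.pyGetD_eq_getElem _ _ h0 (by rw [hlen]; omega),
      PySem.List.getElem_pyRange_one]
  omega

-- One loop iteration advances the closed-form state by one step modulo the period.
theorem pillowStep_closed (n : Int) (hn : 2 ≤ n) (r : Int)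
    (hr0 : 0 ≤ r) (hrlt : r < 2 * (n - 1)) (i : Int) :
    pillowStep n (PySem.List.pyRange 1 (n + 1) 1) (pillowState n r) i
      = pillowState n ((r + 1) % (2 * (n - 1))) := by
  have hr' : (r + 1) % (2 * (n - 1)) = if r + 1 < 2 * (n - 1) then r + 1 else 0 := by
    split_ifs with h
    · exact Int.emod_eq_of_lt (by omega) h
    · have : r + 1 = 2 * (n - 1) := by omega
      simp [this]
  rw [hr']
  unfold pillowStep pillowState
  by_cases hfwd : r ≤ n - 2
  · -- forward leg: index goes r → r + 1, item = r + 2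
    have hidx : (if r ≤ n - 1 then r else 2 * (n - 1) - r) = r := if_pos (by omega)
    simp only [hidx, hfwd, decide_true, if_true,
      pillow_array_get n (r + 1) (by omega) (by omega)]
    have : r + 1 < 2 * (n - 1) := by omega
    simp only [this, if_true]
    split_ifs <;> simp_all <;> omega
  · -- return leg (n - 1 ≤ r): index goes 2*(n-1) - r → 2*(n-1) - r - 1
    have hidx : (if r ≤ n - 1 then r else 2 * (n - 1) - r) = 2 * (n - 1) - r := by
      by_cases h : r ≤ n - 1
      · have : r = n - 1 := by omega
        rw [if_pos h, this]; ring
      · exact if_neg h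
    simp only [hidx, hfwd, decide_false, Bool.false_eq_true, if_false,
      pillow_array_get n (2 * (n - 1) - r - 1) (by omega) (by omega), Prod.mk.injEq]
    constructor
    · split_ifs <;> omega
    · split_ifs <;> simp <;> omega

-- Invariant: after k iterations A's state is the closed-form state at k % (2*(n-1)).
theorem pillow_loop_inv (n : Int) (hn : 2 ≤ n) (k : Nat) :
    (PySem.List.pyRange 0 (k : Int) 1).foldl
        (pillowStep n (PySem.List.pyRange 1 (n + 1) 1)) (0, true)
      = pillowState n ((k : Int) % (2 * (n - 1))) := by
  have hm : (0 : Int) < 2 * (n - 1) := by omega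
  induction k with
  | zero =>
    simp [pillowState]
    omega
  | succ k ih =>
    have hsplit : PySem.List.pyRange 0 ((k : Nat) + 1 : Int) 1
        = PySem.List.pyRange 0 (k : Int) 1 ++ [(k : Int)] := by
      have := PySem.List.pyRange_one_succ_right (a := 0) (b := (k : Int)) (by positivity)
      simpa using this
    have hr0 : 0 ≤ (k : Int) % (2 * (n - 1)) := Int.emod_nonneg _ (by omega)
    have hrlt : (k : Int) % (2 * (n - 1)) < 2 * (n - 1) := Int.emod_lt_of_pos _ hm
    have h1m : (1 : Int) % (2 * (n - 1)) = 1 := Int.emod_eq_of_lt (by omega) (by omega)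
    have hmod : ((k : Int) + 1) % (2 * (n - 1))
        = ((k : Int) % (2 * (n - 1)) + 1) % (2 * (n - 1)) := by
      rw [Int.add_emod, h1m]
    push_cast
    rw [hsplit, List.foldl_append, ih]
    simp only [List.foldl_cons, List.foldl_nil]
    rw [pillowStep_closed n hn _ hr0 hrlt, hmod]

-- ===== VERDICT (by name: the statement is the Claim_ definition above) =====
theorem passThePillow_spec : Claim_equal_passThePillow := by
  intro n time _ hpre
  simp only [Spec_passThePillow, passThePillow, passThePillow_alt]
  by_cases ht : time ≤ 0
  · rw [PySem.List.pyRange_one_eq_nil ht]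
    simp [ht]
  · have hn : 2 ≤ n := by
      cases hpre with
      | inl h => exact h
      | inr h => omega
    have hm : (0 : Int) < 2 * (n - 1) := by omega
    have htime : time = ((time.toNat : Nat) : Int) := by omega
    rw [if_neg ht]
    conv_lhs => rw [htime]
    rw [pillow_loop_inv n hn time.toNat, PySem.Int.mod_eq_emod_of_pos hm]
    have hr0 : 0 ≤ time % (2 * (n - 1)) := Int.emod_nonneg _ (by omega)
    have hrlt : time % (2 * (n - 1)) < 2 * (n - 1) := Int.emod_lt_of_pos _ hm
    rw [← htime]
    unfold pillowState
    simp only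
    split_ifs <;> omega
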